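-- pv_equiv track=rewrite | github.com/roopank20/Deceptive-Reviews-Classifier | Deceptive_Reviews_Classifier/SeekTruth.py | checkLaplace
-- ===== SOURCE A (Python) =====
-- def checkLaplace(revList, dSet, tSet):
--     dflag = 0
--     tflag = 0
--
--     for word in revList:
--         if word not in dSet:
--             dflag = 1
--             break
--
--     for word in revList:
--         if word not in tSet:
--             tflag = 1
--             break
--
--     return dflag, tflag
-- ===== SOURCE B (Python) =====
-- def checkLaplace(revList, dSet, tSet):
--     # One fused pass over the reviews with a two-flag accumulator and set
--     # membership; stops as soon as both flags are known, instead of A's two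
--     # separate early-break scans with linear list membership.
--     dwords = set(dSet)
--     twords = set(tSet)
--     dflag = 0
--     tflag = 0
--     for word in revList:
--         if dflag and tflag:
--             break
--         if not dflag and word not in dwords:
--             dflag = 1
--         if not tflag and word not in twords:
--             tflag = 1
--     return dflag, tflag
-- ===== Notes on version B (the rewrite author's own statement) =====
-- stated objective: alternative
-- what changed: Fuses A's two staged early-break scans into one pass carrying both flags in an accumulator (stopping once both are set), and replaces the linear list-membership test inside the loop with hashed set lookups built once.
import Mathlib
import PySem

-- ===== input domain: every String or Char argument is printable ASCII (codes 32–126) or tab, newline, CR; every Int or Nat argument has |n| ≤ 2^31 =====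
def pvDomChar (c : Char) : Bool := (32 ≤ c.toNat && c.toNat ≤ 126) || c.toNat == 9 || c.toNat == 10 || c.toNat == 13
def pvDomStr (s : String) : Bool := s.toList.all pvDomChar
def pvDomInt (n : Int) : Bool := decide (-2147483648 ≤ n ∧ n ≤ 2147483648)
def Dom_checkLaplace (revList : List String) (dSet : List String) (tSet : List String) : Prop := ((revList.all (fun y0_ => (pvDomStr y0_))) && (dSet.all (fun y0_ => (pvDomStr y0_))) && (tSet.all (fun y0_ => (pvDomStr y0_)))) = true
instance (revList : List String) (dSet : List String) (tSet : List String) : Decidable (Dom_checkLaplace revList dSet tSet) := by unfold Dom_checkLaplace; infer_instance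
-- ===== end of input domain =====

-- B fuses A's two staged early-break scans into one accumulator pass with set lookups (same return value).

-- ===== PORT A =====
-- transliteration of A's 'for word in revList: if word not in S: flag = 1; break'
def pvScanA (revList : List String) (s : List String) : Int :=
  match revList with
  | [] => 0
  | w :: rest => if ¬ (s.contains w) then 1 else pvScanA rest s

def checkLaplace (revList : List String) (dSet : List String) (tSet : List String) : Int × Int :=
  (pvScanA revList dSet, pvScanA revList tSet)

-- ===== PORT B =====
-- the fused loop of Source B: carries (dflag, tflag); breaks when both are set
def pvLoopB (dwords twords : PySem.Set String) : List String → Int → Int → Int × Int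
  | [], d, t => (d, t)
  | w :: rest, d, t =>
    if d ≠ 0 ∧ t ≠ 0 then (d, t)
    else
      let d' := if d = 0 ∧ ¬ (dwords.contains w) then 1 else d
      let t' := if t = 0 ∧ ¬ (twords.contains w) then 1 else t
      pvLoopB dwords twords rest d' t'

def checkLaplace_alt (revList : List String) (dSet : List String) (tSet : List String) : Int × Int :=
  pvLoopB (PySem.Set.ofList dSet) (PySem.Set.ofList tSet) revList 0 0

-- ===== PRECONDITION & SPEC =====
def Spec_checkLaplace (revList : List String) (dSet : List String) (tSet : List String) (out : Int × Int) : Prop := out = checkLaplace_alt revList dSet tSet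
instance (revList : List String) (dSet : List String) (tSet : List String) (out : Int × Int) : Decidable (Spec_checkLaplace revList dSet tSet out) := by unfold Spec_checkLaplace; infer_instance

-- ===== CLAIM (what is proved, stated in full; the proofs are below) =====
def Claim_equal_checkLaplace : Prop := ∀ (revList : List String) (dSet : List String) (tSet : List String), Dom_checkLaplace revList dSet tSet → Spec_checkLaplace revList dSet tSet (checkLaplace revList dSet tSet)

-- ===== LEMMAS AND PROOFS =====
theorem pvScanA_eq_all (revList s : List String) :
    pvScanA revList s = if revList.all (fun w => s.contains w) then 0 else 1 := by
  induction revList with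
  | nil => simp [pvScanA]
  | cons w rest ih =>
    by_cases h : w ∈ s <;> simp [pvScanA, ih, h]

theorem pvLoopB_eq (dw tw : PySem.Set String) (l : List String) (d t : Int)
    (hd : d = 0 ∨ d = 1) (ht : t = 0 ∨ t = 1) :
    pvLoopB dw tw l d t =
      ((if d = 0 ∧ l.all (fun w => dw.contains w) then 0 else 1),
       (if t = 0 ∧ l.all (fun w => tw.contains w) then 0 else 1)) := by
  induction l generalizing d t with
  | nil =>
    rcases hd with rfl | rfl <;> rcases ht with rfl | rfl <;> simp [pvLoopB]
  | cons w rest ih =>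
    have i00 := ih 0 0 (Or.inl rfl) (Or.inl rfl)
    have i01 := ih 0 1 (Or.inl rfl) (Or.inr rfl)
    have i10 := ih 1 0 (Or.inr rfl) (Or.inl rfl)
    have i11 := ih 1 1 (Or.inr rfl) (Or.inr rfl)
    rcases hd with rfl | rfl <;> rcases ht with rfl | rfl <;>
      by_cases hdw : w ∈ dw <;> by_cases htw : w ∈ tw <;>
      simp [pvLoopB, PySem.Set.contains, hdw, htw, i00, i01, i10, i11]

theorem pvSetContains_eq (s : List String) (w : String) :
    (PySem.Set.ofList s).contains w = s.contains w := by
  have key : ∀ (b c : Bool), (b = true ↔ c = true) → b = c := by decide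
  apply key
  simp [PySem.Set.contains, PySem.Set.mem_ofList]

-- ===== VERDICT (by name: the statement is the Claim_ definition above) =====
theorem checkLaplace_spec : Claim_equal_checkLaplace := by
  intro revList dSet tSet _
  unfold Spec_checkLaplace checkLaplace checkLaplace_alt
  rw [pvLoopB_eq _ _ _ _ _ (Or.inl rfl) (Or.inl rfl)]
  simp only [pvScanA_eq_all, pvSetContains_eq, true_and]
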